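-- pv_equiv track=rewrite | github.com/leonardopadilha/curso_alura_python_ia_aplicada | aula09_avaliacoes.py | contador_e_juntador
-- ===== SOURCE A (Python) =====
-- def contador_e_juntador(lista_de_dicionarios):
--     contador_positivas = 0
--     contador_negativas = 0
--     contador_neutras = 0
--     lista_dicionarios_str = []
--
--     for dicionario in lista_de_dicionarios:
--         if dicionario["avaliacao"] == "Positiva":
--             contador_positivas += 1
--         elif dicionario["avaliacao"] == "Negativa":
--             contador_negativas += 1
--         else:
--             contador_neutras += 1
--
--         lista_dicionarios_str.append(str(dicionario))
--
--     textos_unidos = "#####".join(lista_dicionarios_str)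
--     return contador_positivas, contador_negativas, contador_neutras, textos_unidos
-- ===== SOURCE B (Python) =====
-- def contador_e_juntador(lista_de_dicionarios):
--     avaliacoes = [d["avaliacao"] for d in lista_de_dicionarios]
--     positivas = avaliacoes.count("Positiva")
--     negativas = avaliacoes.count("Negativa")
--     neutras = len(avaliacoes) - positivas - negativas
--     textos_unidos = "#####".join(str(d) for d in lista_de_dicionarios)
--     return positivas, negativas, neutras, textos_unidos
-- ===== Notes on version B (the rewrite author's own statement) =====
-- stated objective: idiomatic
-- what changed: Replaces A's single branching accumulator loop with aggregate passes: list.count for the two named sentiments, neutras derived by subtraction (preserving the else catch-all), and a join over a generator of str(d).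
import Mathlib
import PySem

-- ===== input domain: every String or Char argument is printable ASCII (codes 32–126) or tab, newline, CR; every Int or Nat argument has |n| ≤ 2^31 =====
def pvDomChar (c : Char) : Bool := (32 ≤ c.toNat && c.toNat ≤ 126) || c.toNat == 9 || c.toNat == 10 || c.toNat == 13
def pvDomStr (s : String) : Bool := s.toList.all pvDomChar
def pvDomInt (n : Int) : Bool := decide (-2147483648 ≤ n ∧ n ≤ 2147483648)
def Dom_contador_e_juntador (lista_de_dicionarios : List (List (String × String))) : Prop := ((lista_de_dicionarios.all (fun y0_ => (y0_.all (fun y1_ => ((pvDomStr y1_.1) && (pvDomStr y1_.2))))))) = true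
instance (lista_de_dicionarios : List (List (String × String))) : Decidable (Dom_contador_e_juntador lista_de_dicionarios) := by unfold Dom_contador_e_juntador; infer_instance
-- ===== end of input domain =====

-- B replaces A's branching accumulator loop with aggregate count passes (neutras by subtraction) and a join over str(d); equal return values, no speed claim.

-- Shared helper: Python's str() of a dict (exact on the Dom character set: printable ASCII, tab, newline, CR).
-- repr of a string: backslash/tab/newline/CR escaped; double quotes used iff the string contains ' but not ".
def pyEscChar (q : Char) (c : Char) : List Char :=
  if c = '\\' then ['\\', '\\']
  else if c = '\t' then ['\\', 't']
  else if c = '\n' then ['\\', 'n']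
  else if c = '\r' then ['\\', 'r']
  else if c = q then ['\\', q]
  else [c]

def pyReprStr (s : String) : String :=
  let cs := s.toList
  let q : Char := if cs.contains '\'' && !cs.contains '"' then '"' else '\''
  String.mk ([q] ++ cs.flatMap (pyEscChar q) ++ [q])

-- str(dicionario): the assoc list has Python-dict semantics (first occurrence wins the position, later values overwrite) = PySem.Dict.ofList
def pyStrDict (d : List (String × String)) : String :=
  String.mk ('{' :: (PySem.Str.join ", "
    (((PySem.Dict.ofList d).items).map (fun p =>
      String.mk ((pyReprStr p.1).toList ++ ": ".toList ++ (pyReprStr p.2).toList)))).toList ++ ['}'])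

-- ===== PORT A =====
-- A's loop: one branching pass accumulating (positivas, negativas, neutras, list of str(d)).
-- dicionario["avaliacao"] would raise KeyError when the key is absent; Pre_ excludes that, the port reads getD "" there.
def contador_e_juntador (lista_de_dicionarios : List (List (String × String))) : Int × Int × Int × String :=
  let st := lista_de_dicionarios.foldl
    (fun (st : Int × Int × Int × List String) dicionario =>
      let (p, n, z, strs) := st
      let v := ((PySem.Dict.ofList dicionario).get? "avaliacao").getD ""
      let st' :=
        if v = "Positiva" then (p + 1, n, z)
        else if v = "Negativa" then (p, n + 1, z)
        else (p, n, z + 1)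
      (st'.1, st'.2.1, st'.2.2, strs ++ [pyStrDict dicionario]))
    (0, 0, 0, [])
  (st.1, st.2.1, st.2.2.1, PySem.Str.join "#####" st.2.2.2)

-- ===== PORT B =====
def contador_e_juntador_alt (lista_de_dicionarios : List (List (String × String))) : Int × Int × Int × String :=
  let avaliacoes := lista_de_dicionarios.map (fun d => ((PySem.Dict.ofList d).get? "avaliacao").getD "")
  let positivas : Int := PySem.List.count avaliacoes "Positiva"
  let negativas : Int := PySem.List.count avaliacoes "Negativa"
  let neutras : Int := (avaliacoes.length : Int) - positivas - negativas
  (positivas, negativas, neutras,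
    PySem.Str.join "#####" (lista_de_dicionarios.map pyStrDict))

-- ===== PRECONDITION & SPEC =====
-- Pre_ excludes exactly the inputs on which Python A raises KeyError: a dict without the key "avaliacao".
def Pre_contador_e_juntador (lista_de_dicionarios : List (List (String × String))) : Prop :=
  ∀ d ∈ lista_de_dicionarios, ∃ p ∈ d, p.1 = "avaliacao"
instance (lista_de_dicionarios : List (List (String × String))) : Decidable (Pre_contador_e_juntador lista_de_dicionarios) := by unfold Pre_contador_e_juntador; infer_instance
def pvWitness_contador_e_juntador : (List (List (String × String))) :=
  [[("avaliacao", "Positiva")], [("avaliacao", "Neutra"), ("nota", "3")]]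
def Spec_contador_e_juntador (lista_de_dicionarios : List (List (String × String))) (out : Int × Int × Int × String) : Prop := out = contador_e_juntador_alt lista_de_dicionarios
instance (lista_de_dicionarios : List (List (String × String))) (out : Int × Int × Int × String) : Decidable (Spec_contador_e_juntador lista_de_dicionarios out) := by unfold Spec_contador_e_juntador; infer_instance

-- ===== CLAIM (what is proved, stated in full; the proofs are below) =====
def Claim_equal_contador_e_juntador : Prop := ∀ (lista_de_dicionarios : List (List (String × String))), Dom_contador_e_juntador lista_de_dicionarios → Pre_contador_e_juntador lista_de_dicionarios → Spec_contador_e_juntador lista_de_dicionarios (contador_e_juntador lista_de_dicionarios)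

-- ===== LEMMAS AND PROOFS =====

-- Loop invariant: A's fold from an arbitrary state, expressed through B's aggregates.
theorem contador_loop (l : List (List (String × String))) (p n z : Int) (strs : List String) :
    l.foldl
      (fun (st : Int × Int × Int × List String) dicionario =>
        let (p, n, z, strs) := st
        let v := ((PySem.Dict.ofList dicionario).get? "avaliacao").getD ""
        let st' :=
          if v = "Positiva" then (p + 1, n, z)
          else if v = "Negativa" then (p, n + 1, z)
          else (p, n, z + 1)
        (st'.1, st'.2.1, st'.2.2, strs ++ [pyStrDict dicionario]))
      (p, n, z, strs)
    = (p + PySem.List.count (l.map (fun d => ((PySem.Dict.ofList d).get? "avaliacao").getD "")) "Positiva",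
       n + PySem.List.count (l.map (fun d => ((PySem.Dict.ofList d).get? "avaliacao").getD "")) "Negativa",
       z + ((l.length : Int)
            - PySem.List.count (l.map (fun d => ((PySem.Dict.ofList d).get? "avaliacao").getD "")) "Positiva"
            - PySem.List.count (l.map (fun d => ((PySem.Dict.ofList d).get? "avaliacao").getD "")) "Negativa"),
       strs ++ l.map pyStrDict) := by
  induction l generalizing p n z strs with
  | nil => simp
  | cons d l ih =>
    simp only [List.foldl_cons, List.map_cons, List.length_cons]
    rw [ih]
    by_cases h1 : ((PySem.Dict.ofList d).get? "avaliacao").getD "" = "Positiva"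
    · simp [h1, PySem.List.count_eq, List.append_assoc]
      push_cast
      omega
    · by_cases h2 : ((PySem.Dict.ofList d).get? "avaliacao").getD "" = "Negativa"
      · simp [h1, h2, PySem.List.count_eq, List.append_assoc]
        push_cast
        omega
      · simp [h1, h2, PySem.List.count_eq, List.append_assoc]
        push_cast
        omega

-- ===== VERDICT (by name: the statement is the Claim_ definition above) =====
theorem contador_e_juntador_spec : Claim_equal_contador_e_juntador := by
  intro l _ _
  show contador_e_juntador l = contador_e_juntador_alt l
  unfold contador_e_juntador contador_e_juntador_alt
  rw [contador_loop]
  simp
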